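-- pv_equiv track=rewrite | github.com/andreacrt90/AI_exercise | n_queens/min_conflicts.py | check_element_conflicts
-- ===== SOURCE A (Python) =====
-- def check_element_conflicts(matrix, targetQueenRow, targetQueenCol):
--     conflicts_list = []
--     for row in range(len(matrix)):
--         for col in range(len(matrix)):
--             if matrix[row][col] == "[Q]":
--                 if col == targetQueenCol:
--                     continue
--                 # check horizontal conflicts
--                 if row == targetQueenRow:
--                     conflicts_list.append(col)
--                 # check diagonal conflicts
--                 if abs(col - targetQueenCol) == abs(row - targetQueenRow):
--                     conflicts_list.append(col)
--     return conflicts_list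
-- ===== SOURCE B (Python) =====
-- def check_element_conflicts(matrix, targetQueenRow, targetQueenCol):
--     # O(n): scan only the target row (horizontal) and the two diagonal cells of every other row.
--     n = len(matrix)
--     conflicts_list = []
--     for row in range(n):
--         if row == targetQueenRow:
--             for col in range(n):
--                 if col != targetQueenCol and matrix[row][col] == "[Q]":
--                     conflicts_list.append(col)
--         else:
--             d = abs(row - targetQueenRow)
--             lo = targetQueenCol - d
--             hi = targetQueenCol + d
--             if 0 <= lo < n and matrix[row][lo] == "[Q]":
--                 conflicts_list.append(lo)
--             if 0 <= hi < n and matrix[row][hi] == "[Q]":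
--                 conflicts_list.append(hi)
--     return conflicts_list
-- ===== Notes on version B (the rewrite author's own statement) =====
-- stated objective: faster
-- what changed: Instead of scanning all n^2 cells, B scans only the target row for horizontal conflicts and probes the two diagonal cells (targetQueenCol +/- row distance) of every other row; Pre_ excludes only ragged matrices with a row shorter than len(matrix), on which A raises IndexError.
import Mathlib
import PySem

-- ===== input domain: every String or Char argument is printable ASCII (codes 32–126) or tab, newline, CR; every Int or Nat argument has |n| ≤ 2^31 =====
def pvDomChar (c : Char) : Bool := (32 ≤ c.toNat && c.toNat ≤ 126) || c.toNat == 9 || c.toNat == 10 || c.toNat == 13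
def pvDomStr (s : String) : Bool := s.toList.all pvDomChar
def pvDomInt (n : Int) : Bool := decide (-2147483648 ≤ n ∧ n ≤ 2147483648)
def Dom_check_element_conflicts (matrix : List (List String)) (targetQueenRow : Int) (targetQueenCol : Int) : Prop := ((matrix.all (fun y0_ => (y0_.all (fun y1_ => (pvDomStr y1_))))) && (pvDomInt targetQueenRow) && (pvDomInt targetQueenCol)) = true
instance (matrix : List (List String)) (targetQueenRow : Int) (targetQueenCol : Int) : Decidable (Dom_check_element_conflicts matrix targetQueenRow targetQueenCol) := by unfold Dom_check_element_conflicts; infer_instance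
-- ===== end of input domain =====

-- B replaces A's scan of all n^2 cells by a scan of the target row plus the two diagonal cells of
-- every other row (objective: faster).

-- shared cell access matrix[row][col] (both Pythons index the same way; indices are never negative
-- here, and Pre_ keeps every accessed index in range, so the default "" is never the value read)
def pvCell (matrix : List (List String)) (row col : Int) : String :=
  PySem.List.pyGetD (PySem.List.pyGetD matrix row []) col ""

-- ===== PORT A =====
def check_element_conflicts (matrix : List (List String)) (targetQueenRow : Int) (targetQueenCol : Int) : List Int :=
  (PySem.List.pyRange 0 (matrix.length : Int) 1).foldl (fun acc row =>
    (PySem.List.pyRange 0 (matrix.length : Int) 1).foldl (fun acc col =>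
      if pvCell matrix row col == "[Q]" then
        if col == targetQueenCol then acc
        else
          let acc := if row == targetQueenRow then acc ++ [col] else acc
          if (col - targetQueenCol).natAbs == (row - targetQueenRow).natAbs then acc ++ [col] else acc
      else acc) acc) []

-- ===== PORT B =====
def check_element_conflicts_alt (matrix : List (List String)) (targetQueenRow : Int) (targetQueenCol : Int) : List Int :=
  (PySem.List.pyRange 0 (matrix.length : Int) 1).foldl (fun acc row =>
    if row == targetQueenRow then
      (PySem.List.pyRange 0 (matrix.length : Int) 1).foldl (fun acc col =>
        if col != targetQueenCol && pvCell matrix row col == "[Q]" then acc ++ [col] else acc) acc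
    else
      let d : Int := ((row - targetQueenRow).natAbs : Int)
      let lo := targetQueenCol - d
      let hi := targetQueenCol + d
      let acc := if (0 ≤ lo && lo < (matrix.length : Int)) && pvCell matrix row lo == "[Q]" then acc ++ [lo] else acc
      if (0 ≤ hi && hi < (matrix.length : Int)) && pvCell matrix row hi == "[Q]" then acc ++ [hi] else acc) []

-- ===== PRECONDITION & SPEC =====
-- Pre_ excludes exactly the ragged matrices with some row shorter than len(matrix): there Python A
-- raises IndexError (it reads every cell matrix[row][col] for col in range(len(matrix))).
def Pre_check_element_conflicts (matrix : List (List String)) (targetQueenRow : Int) (targetQueenCol : Int) : Prop :=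
  ∀ r ∈ matrix, matrix.length ≤ r.length
instance (matrix : List (List String)) (targetQueenRow : Int) (targetQueenCol : Int) : Decidable (Pre_check_element_conflicts matrix targetQueenRow targetQueenCol) := by unfold Pre_check_element_conflicts; infer_instance

def pvWitness_check_element_conflicts : List (List String) × Int × Int :=
  ([["[Q]", "   "], ["   ", "[Q]"]], 0, 1)

def Spec_check_element_conflicts (matrix : List (List String)) (targetQueenRow : Int) (targetQueenCol : Int) (out : List Int) : Prop := out = check_element_conflicts_alt matrix targetQueenRow targetQueenCol
instance (matrix : List (List String)) (targetQueenRow : Int) (targetQueenCol : Int) (out : List Int) : Decidable (Spec_check_element_conflicts matrix targetQueenRow targetQueenCol out) := by unfold Spec_check_element_conflicts; infer_instance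

-- ===== CLAIM (what is proved, stated in full; the proofs are below) =====
def Claim_equal_check_element_conflicts : Prop := ∀ (matrix : List (List String)) (targetQueenRow : Int) (targetQueenCol : Int), Dom_check_element_conflicts matrix targetQueenRow targetQueenCol → Pre_check_element_conflicts matrix targetQueenRow targetQueenCol → Spec_check_element_conflicts matrix targetQueenRow targetQueenCol (check_element_conflicts matrix targetQueenRow targetQueenCol)

-- ===== LEMMAS AND PROOFS =====

lemma pv_flatMap_congr {α β : Type} {l : List α} {f g : α → List β}
    (h : ∀ x ∈ l, f x = g x) : l.flatMap f = l.flatMap g := by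
  induction l with
  | nil => rfl
  | cons c t ih =>
    simp only [List.flatMap_cons, h c (by simp), ih (fun x hx => h x (by simp [hx]))]

lemma pv_flatMap_filter {α : Type} (l : List α) (p : α → Bool) :
    l.flatMap (fun c => if p c then [c] else []) = l.filter p := by
  induction l with
  | nil => rfl
  | cons c t ih =>
    by_cases hc : p c <;> simp [List.flatMap_cons, ih, hc]

-- a scan that can pick up at most the two values x < y equals the two direct probes
lemma pv_flatMap_two (l : List Int) (hl : l.Pairwise (· < ·)) (P : Int → Bool) (x y : Int)
    (hxy : x < y) (h : ∀ c, P c = true → c = x ∨ c = y) :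
    l.flatMap (fun c => if P c then [c] else []) =
      (if x ∈ l ∧ P x then [x] else []) ++ (if y ∈ l ∧ P y then [y] else []) := by
  induction l with
  | nil => simp
  | cons c t ih =>
    have hc : ∀ z ∈ t, c < z := (List.pairwise_cons.mp hl).1
    have ht := (List.pairwise_cons.mp hl).2
    by_cases hPc : P c = true
    · rcases h c hPc with rfl | rfl
      · have hct : c ∉ t := fun hm => lt_irrefl c (hc c hm)
        have hyc : y ≠ c := ne_of_gt hxy
        simp [List.flatMap_cons, ih ht, hPc, List.mem_cons, hct, hyc]
      · have hct : c ∉ t := fun hm => lt_irrefl c (hc c hm)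
        have hxt : x ∉ t := fun hm => lt_irrefl x (hxy.trans (hc x hm))
        have hxc : x ≠ c := ne_of_lt hxy
        simp [List.flatMap_cons, ih ht, hPc, List.mem_cons, hct, hxt, hxc]
    · have hPc' : P c = false := by simpa using hPc
      simp only [List.flatMap_cons, hPc', Bool.false_eq_true, if_false, List.nil_append,
        ih ht, List.mem_cons]
      congr 1
      · by_cases hx : x = c
        · simp [hx, hPc']
        · simp [hx]
      · by_cases hy : y = c
        · simp [hy, hPc']
        · simp [hy]

-- A's per-row contribution as a flatMap
def pvGA (matrix : List (List String)) (tr tc row col : Int) : List Int :=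
  if pvCell matrix row col == "[Q]" then
    if col == tc then []
    else (if row == tr then [col] else []) ++
         (if (col - tc).natAbs == (row - tr).natAbs then [col] else [])
  else []

lemma pv_innerA (matrix : List (List String)) (tr tc row : Int) (acc : List Int) :
    (PySem.List.pyRange 0 (matrix.length : Int) 1).foldl (fun acc col =>
      if pvCell matrix row col == "[Q]" then
        if col == tc then acc
        else
          let acc := if row == tr then acc ++ [col] else acc
          if (col - tc).natAbs == (row - tr).natAbs then acc ++ [col] else acc
      else acc) acc
    = acc ++ (PySem.List.pyRange 0 (matrix.length : Int) 1).flatMap (pvGA matrix tr tc row) := by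
  rw [PySem.List.foldl_congr_mem (g := fun acc col => acc ++ pvGA matrix tr tc row col)]
  · exact PySem.List.foldl_append_eq_flatMap _ _ _
  · intro a c _
    simp only [pvGA]
    split_ifs <;> simp

-- per-row equality of the two algorithms
lemma pv_row_eq (matrix : List (List String)) (tr tc row : Int) :
    (PySem.List.pyRange 0 (matrix.length : Int) 1).flatMap (pvGA matrix tr tc row) =
      (if row == tr then
        (PySem.List.pyRange 0 (matrix.length : Int) 1).filter
          (fun col => col != tc && pvCell matrix row col == "[Q]")
      else
        (if (0 ≤ tc - ((row - tr).natAbs : Int) && tc - ((row - tr).natAbs : Int) < (matrix.length : Int)) && pvCell matrix row (tc - ((row - tr).natAbs : Int)) == "[Q]" then [tc - ((row - tr).natAbs : Int)] else []) ++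
        (if (0 ≤ tc + ((row - tr).natAbs : Int) && tc + ((row - tr).natAbs : Int) < (matrix.length : Int)) && pvCell matrix row (tc + ((row - tr).natAbs : Int)) == "[Q]" then [tc + ((row - tr).natAbs : Int)] else [])) := by
  by_cases hr : row = tr
  · subst hr
    simp only [beq_self_eq_true, if_true]
    rw [← pv_flatMap_filter]
    apply pv_flatMap_congr
    intro c _
    simp only [pvGA]
    by_cases hq : pvCell matrix row c == "[Q]"
    · by_cases hct : c = tc
      · subst hct; simp [hq]
      · simp [hq, hct]
        omega
    · simp [hq]
  · have hrb : (row == tr) = false := by simp [hr]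
    have hxy : tc - ((row - tr).natAbs : Int) < tc + ((row - tr).natAbs : Int) := by omega
    rw [pv_flatMap_congr (g := fun c =>
        if ((pvCell matrix row c == "[Q]") && (decide (c = tc - ((row - tr).natAbs : Int)) || decide (c = tc + ((row - tr).natAbs : Int)))) then [c] else [])]
    · rw [pv_flatMap_two _ (PySem.List.pairwise_lt_pyRange_one _ _) _ _ _ hxy]
      · simp only [hrb, Bool.false_eq_true, if_false, PySem.List.mem_pyRange_one]
        congr 1
        · split_ifs with h1 h2 h2 <;>
            first
            | rfl
            | (exfalso; simp only [Bool.and_eq_true, Bool.or_eq_true, decide_eq_true_eq] at h1 h2 ⊢; tauto)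
        · split_ifs with h1 h2 h2 <;>
            first
            | rfl
            | (exfalso; simp only [Bool.and_eq_true, Bool.or_eq_true, decide_eq_true_eq] at h1 h2 ⊢; tauto)
      · intro c hP
        simp only [Bool.and_eq_true, Bool.or_eq_true, decide_eq_true_eq] at hP
        exact hP.2
    · intro c _
      simp only [pvGA, hrb, Bool.false_eq_true, if_false, List.nil_append]
      by_cases hq : (pvCell matrix row c == "[Q]") = true
      · simp only [hq, if_true, Bool.true_and]
        by_cases hct : c = tc
        · have h2 : (decide (c = tc - ((row - tr).natAbs : Int)) || decide (c = tc + ((row - tr).natAbs : Int))) = false := by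
            simp only [Bool.or_eq_false_iff, decide_eq_false_iff_not]
            omega
          have hcb : (c == tc) = true := beq_iff_eq.mpr hct
          rw [hcb, h2]
          simp
        · have h3 : ((c - tc).natAbs == (row - tr).natAbs) = (decide (c = tc - ((row - tr).natAbs : Int)) || decide (c = tc + ((row - tr).natAbs : Int))) := by
            by_cases h : (c - tc).natAbs = (row - tr).natAbs
            · have hl : ((c - tc).natAbs == (row - tr).natAbs) = true := by simpa using h
              have : c = tc - ((row - tr).natAbs : Int) ∨ c = tc + ((row - tr).natAbs : Int) := by omega
              rcases this with h4 | h4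
              · rw [hl, decide_eq_true h4, Bool.true_or]
              · rw [hl, decide_eq_true h4, Bool.or_true]
            · have hl : ((c - tc).natAbs == (row - tr).natAbs) = false := by simpa using h
              have h4 : ¬ c = tc - ((row - tr).natAbs : Int) := by omega
              have h5 : ¬ c = tc + ((row - tr).natAbs : Int) := by omega
              rw [hl, decide_eq_false h4, decide_eq_false h5, Bool.or_false]
          have hcb : (c == tc) = false := by simp [hct]
          rw [hcb, h3]
          simp
      · simp [hq]

lemma pv_innerB (matrix : List (List String)) (tc row : Int) (acc : List Int) :
    (PySem.List.pyRange 0 (matrix.length : Int) 1).foldl (fun acc col =>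
      if col != tc && pvCell matrix row col == "[Q]" then acc ++ [col] else acc) acc
    = acc ++ (PySem.List.pyRange 0 (matrix.length : Int) 1).filter
        (fun col => col != tc && pvCell matrix row col == "[Q]") :=
  PySem.List.foldl_append_if_eq_filter _ _ _

-- ===== VERDICT (by name: the statement is the Claim_ definition above) =====
theorem check_element_conflicts_spec : Claim_equal_check_element_conflicts := by
  intro matrix tr tc _ _
  unfold Spec_check_element_conflicts check_element_conflicts check_element_conflicts_alt
  apply PySem.List.foldl_congr_mem
  intro acc row _
  rw [pv_innerA matrix tr tc row acc, pv_row_eq matrix tr tc row]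
  by_cases hr : row = tr
  · subst hr
    simp only [beq_self_eq_true, if_true]
    exact (pv_innerB matrix tc row acc).symm
  · have hrb : (row == tr) = false := by simp [hr]
    simp only [hrb, Bool.false_eq_true, if_false]
    split_ifs <;> simp
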